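-- pv_equiv track=rewrite | github.com/JeongJaeHyung/SYNEX-QUOTATION | backend/api/v1/export/excel/Format/header.py | number_to_korean
-- ===== SOURCE A (Python) =====
-- def number_to_korean(number: int) -> str:
--     """
--     JS의 numberToKorean과 동일한 로직
--     일금 X만 X천 X백원 정 형식으로 변환
--     """
--     if number == 0:
--         return "일금 영원 정"
--
--     units = ["", "만", "억", "조", "경"]
--     nums = ["영", "일", "이", "삼", "사", "오", "육", "칠", "팔", "구"]
--     decimals = ["", "십", "백", "천"]
--
--     str_num = str(number)
--     result = ""
--     unit_index = 0
--
--     while len(str_num) > 0: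
--         chunk = str_num[-4:]
--         str_num = str_num[:-4]
--         chunk_res = ""
--
--         for i, digit in enumerate(reversed(chunk)):
--             d = int(digit)
--             if d > 0:
--                 chunk_res = nums[d] + decimals[i] + chunk_res
--
--         if chunk_res:
--             result = chunk_res + units[unit_index] + result
--         unit_index += 1
--
--     return f"일금 {result}원 정"
-- ===== SOURCE B (Python) =====
-- def number_to_korean(number: int) -> str:
--     """Single flat left-to-right pass over the digits; no slicing, no nested loop."""
--     if number == 0:
--         return "일금 영원 정"
--
--     units = ["", "만", "억", "조", "경"]
--     nums = ["영", "일", "이", "삼", "사", "오", "육", "칠", "팔", "구"]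
--     decimals = ["", "십", "백", "천"]
--
--     s = str(number)
--     n = len(s)
--     out = []
--     group_nonzero = False
--     for pos in range(n):
--         i = n - 1 - pos  # place value of this digit, counted from the right
--         d = int(s[pos])
--         if d > 0:
--             out.append(nums[d] + decimals[i % 4])
--             group_nonzero = True
--         if i % 4 == 0:
--             if group_nonzero:
--                 out.append(units[i // 4])
--             group_nonzero = False
--
--     return f"일금 {''.join(out)}원 정"
-- ===== Notes on version B (the rewrite author's own statement) =====
-- stated objective: simpler
-- what changed: Replaces the while-loop that repeatedly slices off four-character chunks and runs an inner reversed-enumerate loop (building the result by prepending) with a single flat left-to-right pass over the digit string that appends each digit's piece and emits a group unit at each group-of-four boundary using a per-group nonzero flag; Pre_ excludes negative numbers, on which both implementations raise ValueError.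
import Mathlib
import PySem

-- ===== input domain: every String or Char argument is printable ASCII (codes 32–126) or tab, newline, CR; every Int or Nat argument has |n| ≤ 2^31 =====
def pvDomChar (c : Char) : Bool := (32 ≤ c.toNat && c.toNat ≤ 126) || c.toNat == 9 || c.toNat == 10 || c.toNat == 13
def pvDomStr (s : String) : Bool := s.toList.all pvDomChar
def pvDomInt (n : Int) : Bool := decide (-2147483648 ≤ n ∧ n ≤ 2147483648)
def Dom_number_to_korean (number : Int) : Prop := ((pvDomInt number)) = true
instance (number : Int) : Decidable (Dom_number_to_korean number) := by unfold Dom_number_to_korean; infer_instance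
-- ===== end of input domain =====

-- B replaces A's chunk-slicing while-loop (with its inner reversed-enumerate loop) by one flat
-- left-to-right pass over the digits with a per-group nonzero flag (objective: simpler).

-- shared constant tables (the same literals appear in both Pythons)
def pvUnits : List String := ["", "만", "억", "조", "경"]
def pvNums : List String := ["영", "일", "이", "삼", "사", "오", "육", "칠", "팔", "구"]
def pvDecimals : List String := ["", "십", "백", "천"]

-- ===== PORT A =====
-- inner loop 'for i, digit in enumerate(reversed(chunk))'; int(digit) is ported as c.toNat - 48,
-- exact on digit chars (Pre_ excludes negative numbers, where Python raises ValueError on '-')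
def pvAInner : List Char → Nat → String → String
  | [], _, acc => acc
  | c :: rest, i, acc =>
    pvAInner rest (i + 1)
      (if c.toNat - 48 > 0 then
        pvNums.getD (c.toNat - 48) "" ++ pvDecimals.getD i "" ++ acc
      else acc)

-- outer 'while len(str_num) > 0' loop; chunk = str_num[-4:], str_num = str_num[:-4]
def pvALoop (strNum : List Char) (unitIndex : Nat) (result : String) : String :=
  if strNum.isEmpty then result
  else
    let chunk := PySem.List.slice strNum (some (-4)) none
    let rest := PySem.List.slice strNum none (some (-4))
    let chunkRes := pvAInner chunk.reverse 0 ""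
    pvALoop rest (unitIndex + 1)
      (if chunkRes ≠ "" then chunkRes ++ pvUnits.getD unitIndex "" ++ result else result)
termination_by strNum.length
decreasing_by
  rename_i h
  have hpos : 0 < strNum.length := by
    cases strNum <;> simp_all
  rw [PySem.List.slice_to_neg_ofNat strNum 4 (by omega)]
  simp [List.length_take]
  omega

def number_to_korean (number : Int) : String :=
  if number == 0 then "일금 영원 정"
  else "일금 " ++ pvALoop (PySem.Int.toStr number).toList 0 "" ++ "원 정"

-- ===== PORT B =====
-- 'for pos in range(n)' with i = n-1-pos, a per-group flag, and a list of appended pieces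
def pvBLoop : List Char → Nat → Nat → Bool → List String → List String
  | [], _, _, _, out => out
  | c :: rest, n, pos, groupNonzero, out =>
    let i := n - 1 - pos
    let d := c.toNat - 48
    let out1 := if d > 0 then out ++ [pvNums.getD d "" ++ pvDecimals.getD (i % 4) ""] else out
    let g1 := if d > 0 then true else groupNonzero
    let out2 := if i % 4 = 0 then (if g1 then out1 ++ [pvUnits.getD (i / 4) ""] else out1) else out1
    let g2 := if i % 4 = 0 then false else g1
    pvBLoop rest n (pos + 1) g2 out2

def number_to_korean_alt (number : Int) : String :=
  if number == 0 then "일금 영원 정"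
  else
    "일금 " ++ PySem.Str.join ""
      (pvBLoop (PySem.Int.toStr number).toList (PySem.Int.toStr number).toList.length 0 false [])
      ++ "원 정"

-- ===== PRECONDITION & SPEC =====
-- Pre_ excludes exactly the negative numbers: there str(number) starts with '-' and int('-')
-- raises ValueError in A (and likewise in B), so A returns no value.
def Pre_number_to_korean (number : Int) : Prop := 0 ≤ number
instance (number : Int) : Decidable (Pre_number_to_korean number) := by unfold Pre_number_to_korean; infer_instance
def pvWitness_number_to_korean : Int := (10203040)

def Spec_number_to_korean (number : Int) (out : String) : Prop := out = number_to_korean_alt number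
instance (number : Int) (out : String) : Decidable (Spec_number_to_korean number out) := by unfold Spec_number_to_korean; infer_instance

-- ===== CLAIM (what is proved, stated in full; the proofs are below) =====
def Claim_equal_number_to_korean : Prop := ∀ (number : Int), Dom_number_to_korean number → Pre_number_to_korean number → Spec_number_to_korean number (number_to_korean number)

-- ===== LEMMAS AND PROOFS =====

-- every char of str(n) for n ≥ 0 is a decimal digit; all we need is code ≤ 57
def pvDigitBound (s : List Char) : Prop := ∀ c ∈ s, c.toNat - 48 ≤ 9

lemma pvDigitChar_bound (m : Nat) (h : m < 10) : (Nat.digitChar m).toNat - 48 ≤ 9 := by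
  interval_cases m <;> decide

lemma pvToDigitsCore_bound (f : Nat) : ∀ (n : Nat) (acc : List Char), pvDigitBound acc →
    pvDigitBound (Nat.toDigitsCore 10 f n acc) := by
  induction f with
  | zero => intro n acc h; simpa [Nat.toDigitsCore] using h
  | succ f ih =>
    intro n acc h
    have hd : pvDigitBound ((n % 10).digitChar :: acc) := by
      intro c hc
      rcases List.mem_cons.mp hc with rfl | hc
      · exact pvDigitChar_bound _ (Nat.mod_lt _ (by omega))
      · exact h _ hc
    simp only [Nat.toDigitsCore]
    split
    · exact hd
    · exact ih _ _ hd

lemma pvToChars_bound (n : Int) (h : 0 ≤ n) : pvDigitBound (PySem.Int.toChars n) := by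
  unfold PySem.Int.toChars
  rw [if_neg (by omega)]
  exact pvToDigitsCore_bound _ _ _ (by intro c hc; simp at hc)

-- string helpers
lemma pvAppend_ne_empty {s : String} (t : String) (h : s ≠ "") : s ++ t ≠ "" := by
  intro hc
  have h2 := congrArg String.toList hc
  simp at h2
  exact h h2.1

lemma pvNums_ne (d : Nat) (h1 : 0 < d) (h2 : d ≤ 9) : pvNums.getD d "" ≠ "" := by
  interval_cases d <;> decide

lemma pvIntercalate_nil (l : List (List Char)) :
    (List.intersperse ([] : List Char) l).flatten = l.flatten := by
  induction l with
  | nil => rfl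
  | cons x l ih => cases l <;> simp_all [List.intersperse]

lemma pvJoin_append (l1 l2 : List String) :
    PySem.Str.join "" (l1 ++ l2) = PySem.Str.join "" l1 ++ PySem.Str.join "" l2 := by
  apply String.ext
  simp [PySem.Str.toList_join, PySem.Chars.join, List.intercalate, pvIntercalate_nil]

lemma pvJoin_nil : PySem.Str.join "" ([] : List String) = "" := by rfl

lemma pvJoin_singleton (s : String) : PySem.Str.join "" [s] = s := by
  apply String.ext
  simp [PySem.Str.toList_join, PySem.Chars.join, List.intercalate]

-- ---------- A-side characterisation ----------

-- chunk list, leftmost chunk first (A's recursion strips the last four)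
def pvChunks (s : List Char) : List (List Char) :=
  if s.isEmpty then []
  else pvChunks (s.take (s.length - 4)) ++ [s.drop (s.length - 4)]
termination_by s.length
decreasing_by
  rename_i h
  have hpos : 0 < s.length := by cases s <;> simp_all
  simp [List.length_take]
  omega

-- rendering of one chunk, as A's inner loop produces it (i = index from the right)
def pvRenderRev : List Char → Nat → String
  | [], _ => ""
  | c :: l, i =>
    pvRenderRev l (i + 1) ++
      (if c.toNat - 48 > 0 then pvNums.getD (c.toNat - 48) "" ++ pvDecimals.getD i "" else "")

def pvPiece (g : List Char) (u : Nat) : String :=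
  if pvRenderRev g.reverse 0 ≠ "" then pvRenderRev g.reverse 0 ++ pvUnits.getD u "" else ""

def pvAStr : List (List Char) → Nat → String
  | [], _ => ""
  | g :: gs, u => pvPiece g (u + gs.length) ++ pvAStr gs u

lemma pvAInner_eq (l : List Char) : ∀ (i : Nat) (acc : String),
    pvAInner l i acc = pvRenderRev l i ++ acc := by
  induction l with
  | nil => intro i acc; simp [pvAInner, pvRenderRev]
  | cons c l ih =>
    intro i acc
    simp only [pvAInner, pvRenderRev, ih]
    split <;> simp [String.append_assoc]

lemma pvAStr_snoc (gs : List (List Char)) : ∀ (g : List Char) (u : Nat),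
    pvAStr (gs ++ [g]) u = pvAStr gs (u + 1) ++ pvPiece g u := by
  induction gs with
  | nil => intro g u; simp [pvAStr]
  | cons g' gs ih =>
    intro g u
    simp only [List.cons_append, pvAStr, ih, List.length_append]
    rw [← String.append_assoc]
    have : u + (gs.length + [g].length) = u + 1 + gs.length := by
      simp only [List.length_cons, List.length_nil]; omega
    rw [this]

lemma pvALoop_eq (N : Nat) : ∀ (s : List Char), s.length ≤ N → ∀ (u : Nat) (res : String),
    pvALoop s u res = pvAStr (pvChunks s) u ++ res := by
  induction N with
  | zero =>
    intro s hs u res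
    have : s = [] := by cases s <;> simp_all
    subst this
    rw [pvALoop, pvChunks]
    simp [pvAStr]
  | succ N ih =>
    intro s hs u res
    by_cases hemp : s.isEmpty
    · rw [pvALoop, if_pos hemp, pvChunks, if_pos hemp]; simp [pvAStr]
    · have hpos : 0 < s.length := by cases s <;> simp_all
      rw [pvALoop, if_neg hemp, pvChunks, if_neg hemp]
      simp only
      rw [PySem.List.slice_to_neg_ofNat s 4 (by omega),
          PySem.List.slice_from_neg_ofNat s 4 (by omega)]
      rw [ih _ (by simp [List.length_take]; omega)]
      rw [pvAStr_snoc, pvAInner_eq, pvPiece]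
      by_cases hne : pvRenderRev ((List.drop (s.length - 4) s).reverse) 0 = ""
      · simp [hne]
      · simp [hne, String.append_assoc]

-- ---------- B-side characterisation ----------

-- pos-free form of B's loop: i equals the length of the remaining suffix
def pvBGo : List Char → Bool → List String
  | [], _ => []
  | c :: rest, gnz =>
    let i := rest.length
    let d := c.toNat - 48
    let p1 : List String := if d > 0 then [pvNums.getD d "" ++ pvDecimals.getD (i % 4) ""] else []
    let g1 := if d > 0 then true else gnz
    if i % 4 = 0 then p1 ++ (if g1 then [pvUnits.getD (i / 4) ""] else []) ++ pvBGo rest false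
    else p1 ++ pvBGo rest g1

lemma pvBLoop_eq_go (s : List Char) : ∀ (n pos : Nat) (gnz : Bool) (out : List String),
    pos + s.length = n → pvBLoop s n pos gnz out = out ++ pvBGo s gnz := by
  induction s with
  | nil => intro n pos gnz out h; simp [pvBLoop, pvBGo]
  | cons c rest ih =>
    intro n pos gnz out h
    have hi : n - 1 - pos = rest.length := by simp at h; omega
    simp only [pvBLoop, pvBGo, hi]
    rw [ih _ (pos + 1) _ _ (by simp at h ⊢; omega)]
    by_cases hd : c.toNat - 48 > 0 <;> by_cases hm : rest.length % 4 = 0 <;>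
      cases gnz <;> simp [hd, hm, List.append_assoc]

-- every digit piece within one chunk, in order (decimal index = distance from its right end)
def pvPieces : List Char → List String
  | [] => []
  | c :: r =>
    (if c.toNat - 48 > 0 then [pvNums.getD (c.toNat - 48) "" ++ pvDecimals.getD r.length ""] else [])
      ++ pvPieces r

def pvAnyPos (g : List Char) : Bool := g.any (fun c => decide (c.toNat - 48 > 0))

lemma pvRenderRev_append (l1 l2 : List Char) : ∀ i,
    pvRenderRev (l1 ++ l2) i = pvRenderRev l2 (i + l1.length) ++ pvRenderRev l1 i := by
  induction l1 with
  | nil => intro i; simp [pvRenderRev]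
  | cons c l ih =>
    intro i
    simp only [List.cons_append, pvRenderRev, ih, List.length_cons]
    rw [String.append_assoc]
    congr 2
    omega

lemma pvJoin_pieces (g : List Char) : PySem.Str.join "" (pvPieces g) = pvRenderRev g.reverse 0 := by
  induction g with
  | nil => simp [pvPieces, pvRenderRev, pvJoin_nil]
  | cons c r ih =>
    rw [show pvPieces (c :: r) =
        (if c.toNat - 48 > 0 then [pvNums.getD (c.toNat - 48) "" ++ pvDecimals.getD r.length ""] else [])
          ++ pvPieces r from rfl]
    rw [pvJoin_append, ih, List.reverse_cons, pvRenderRev_append]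
    congr 1
    simp only [pvRenderRev, List.length_reverse, Nat.zero_add]
    split <;> simp [pvJoin_singleton, pvJoin_nil]

lemma pvPieces_eq_nil_of_not_any (g : List Char) (h : pvAnyPos g = false) : pvPieces g = [] := by
  induction g with
  | nil => rfl
  | cons c r ih =>
    simp [pvAnyPos] at h
    obtain ⟨h1, h2⟩ := h
    have hc : ¬ (c.toNat - 48 > 0) := by omega
    simp only [pvPieces, if_neg hc, List.nil_append]
    exact ih (by simp [pvAnyPos]; exact h2)

lemma pvJoin_pieces_ne (g : List Char) (hb : pvDigitBound g) (h : pvAnyPos g = true) :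
    PySem.Str.join "" (pvPieces g) ≠ "" := by
  induction g with
  | nil => simp [pvAnyPos] at h
  | cons c r ih =>
    by_cases hd : c.toNat - 48 > 0
    · have hne : pvNums.getD (c.toNat - 48) "" ≠ "" :=
        pvNums_ne _ hd (hb c (by simp))
      rw [show pvPieces (c :: r) =
          [pvNums.getD (c.toNat - 48) "" ++ pvDecimals.getD r.length ""] ++ pvPieces r from by
            simp [pvPieces, hd]]
      rw [pvJoin_append, pvJoin_singleton, String.append_assoc]
      exact pvAppend_ne_empty _ hne
    · have hr : pvAnyPos r = true := by
        simp [pvAnyPos] at h ⊢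
        rcases h with h | h
        · omega
        · exact h
      rw [show pvPieces (c :: r) = pvPieces r from by simp [pvPieces, hd]]
      exact ih (fun x hx => hb x (by simp [hx])) hr

-- group decomposition of B's flat loop
set_option maxRecDepth 4096 in
lemma pvBGo_group (g : List Char) : ∀ (gnz : Bool) (t : List Char),
    0 < g.length → g.length ≤ 4 → 4 ∣ t.length →
    pvBGo (g ++ t) gnz =
      pvPieces g ++ (if pvAnyPos g || gnz then [pvUnits.getD (t.length / 4) ""] else [])
        ++ pvBGo t false := by
  induction g with
  | nil => intro gnz t h1 _ _; simp at h1
  | cons c r ih =>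
    intro gnz t _ h2 h3
    simp only [List.length_cons] at h2
    have hrlen : r.length ≤ 3 := by omega
    rcases Nat.eq_zero_or_pos r.length with hr0 | hrpos
    · -- r = []: group boundary
      have hr : r = [] := by cases r <;> simp_all
      subst hr
      have hmod : t.length % 4 = 0 := by omega
      simp only [List.cons_append, List.nil_append, pvBGo]
      rw [if_pos hmod]
      simp only [pvPieces, pvAnyPos, List.any_cons, List.any_nil, Bool.or_false, List.length_nil]
      by_cases hd : c.toNat - 48 > 0 <;> cases gnz <;>
        simp only [hd, hmod, if_true, if_false, decide_true, decide_false, Bool.true_or,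
          Bool.false_or, Bool.or_true, Bool.or_false, List.nil_append, List.append_assoc,
          List.append_nil, if_pos, List.singleton_append, decide_eq_true_eq] <;>
        simp [hd]
    · -- mid-group: (r ++ t).length % 4 = r.length ≠ 0
      have hmod : (r ++ t).length % 4 = r.length := by
        simp only [List.length_append]; omega
      simp only [List.cons_append, pvBGo]
      rw [if_neg (by rw [hmod]; omega)]
      rw [hmod, ih _ t hrpos (by omega) h3]
      simp only [pvPieces, pvAnyPos, List.any_cons]
      have hb : ((r.any fun c => decide (c.toNat - 48 > 0)) || if c.toNat - 48 > 0 then true else gnz)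
              = ((decide (c.toNat - 48 > 0) || r.any fun c => decide (c.toNat - 48 > 0)) || gnz) := by
        by_cases hd : c.toNat - 48 > 0 <;> cases gnz <;> simp [hd]
      simp only [hb]
      simp [List.append_assoc]

-- chunk decomposition lemmas
lemma pvChunks_nil : pvChunks [] = [] := by rw [pvChunks]; simp

lemma pvChunks_small (g : List Char) (h1 : 0 < g.length) (h2 : g.length ≤ 4) :
    pvChunks g = [g] := by
  rw [pvChunks, if_neg (by cases g <;> simp_all)]
  have h0 : g.length - 4 = 0 := by omega
  simp [h0, pvChunks_nil]

lemma pvChunks_step (t : List Char) (h : t ≠ []) :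
    pvChunks t = pvChunks (t.take (t.length - 4)) ++ [t.drop (t.length - 4)] := by
  rw [pvChunks, if_neg (by simpa [List.isEmpty_iff] using h)]

lemma pvChunks_cons (N : Nat) : ∀ (g t : List Char), t.length ≤ N →
    0 < g.length → g.length ≤ 4 → 4 ∣ t.length →
    pvChunks (g ++ t) = g :: pvChunks t := by
  induction N with
  | zero =>
    intro g t ht h1 h2 h3
    have ht0 : t = [] := by cases t <;> simp_all
    subst ht0
    rw [List.append_nil, pvChunks_small g h1 h2, pvChunks_nil]
  | succ N ih =>
    intro g t ht h1 h2 h3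
    rcases Nat.eq_zero_or_pos t.length with ht0 | htpos
    · have ht0 : t = [] := by cases t <;> simp_all
      subst ht0
      rw [List.append_nil, pvChunks_small g h1 h2, pvChunks_nil]
    · have ht4 : 4 ≤ t.length := by omega
      have hlen : (g ++ t).length - 4 = g.length + (t.length - 4) := by simp; omega
      have htake : (g ++ t).take ((g ++ t).length - 4) = g ++ t.take (t.length - 4) := by
        rw [hlen, List.take_append]; simp
      have hdrop : (g ++ t).drop ((g ++ t).length - 4) = t.drop (t.length - 4) := by
        rw [hlen]; simp
      rw [pvChunks_step _ (by cases g <;> simp_all), htake, hdrop]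
      rw [ih g (t.take (t.length - 4)) (by simp [List.length_take]; omega) h1 h2
        (by simp [List.length_take]; omega)]
      rw [pvChunks_step t (by cases t <;> simp_all)]
      simp

lemma pvChunks_length (N : Nat) : ∀ (t : List Char), t.length ≤ N → 4 ∣ t.length →
    (pvChunks t).length = t.length / 4 := by
  induction N with
  | zero =>
    intro t ht h
    have ht0 : t = [] := by cases t <;> simp_all
    subst ht0
    simp [pvChunks_nil]
  | succ N ih =>
    intro t ht h
    rcases Nat.eq_zero_or_pos t.length with ht0 | htpos
    · have ht0 : t = [] := by cases t <;> simp_all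
      subst ht0
      simp [pvChunks_nil]
    · have ht4 : 4 ≤ t.length := by omega
      rw [pvChunks_step t (by cases t <;> simp_all)]
      rw [List.length_append]
      rw [ih (t.take (t.length - 4)) (by simp [List.length_take]; omega)
        (by simp [List.length_take]; omega)]
      simp [List.length_take]
      omega

-- main correspondence
lemma pvMain (N : Nat) : ∀ (s : List Char), s.length ≤ N → pvDigitBound s →
    PySem.Str.join "" (pvBGo s false) = pvAStr (pvChunks s) 0 := by
  induction N with
  | zero =>
    intro s hs hb
    have hs0 : s = [] := by cases s <;> simp_all
    subst hs0
    simp [pvBGo, pvChunks_nil, pvAStr, pvJoin_nil]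
  | succ N ih =>
    intro s hs hb
    rcases Nat.eq_zero_or_pos s.length with hs0 | hpos
    · have hs0 : s = [] := by cases s <;> simp_all
      subst hs0
      simp [pvBGo, pvChunks_nil, pvAStr, pvJoin_nil]
    · set r : Nat := (s.length - 1) % 4 + 1 with hr
      have hr1 : 0 < r := by omega
      have hr4 : r ≤ 4 := by omega
      have hrle : r ≤ s.length := by omega
      have hglen : (s.take r).length = r := by simp [List.length_take]; omega
      have htlen4 : 4 ∣ (s.drop r).length := by simp [List.length_drop]; omega
      have htlenle : (s.drop r).length ≤ N := by simp [List.length_drop]; omega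
      have hgb : pvDigitBound (s.take r) := fun c hc => hb c (List.mem_of_mem_take hc)
      have htb : pvDigitBound (s.drop r) := fun c hc => hb c (List.mem_of_mem_drop hc)
      have hsplit : s = s.take r ++ s.drop r := (List.take_append_drop r s).symm
      rw [hsplit]
      rw [pvBGo_group _ false _ (by rw [hglen]; omega) (by rw [hglen]; omega) htlen4]
      rw [pvChunks_cons N _ _ htlenle (by rw [hglen]; omega) (by rw [hglen]; omega) htlen4]
      rw [pvJoin_append, pvJoin_append]
      rw [ih _ htlenle htb]
      simp only [pvAStr, Nat.zero_add]
      rw [pvChunks_length N _ htlenle htlen4]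
      congr 1
      by_cases hany : pvAnyPos (s.take r) = true
      · rw [if_pos (by simp [hany])]
        rw [pvJoin_singleton]
        rw [pvPiece, if_pos (by rw [← pvJoin_pieces]; exact pvJoin_pieces_ne _ hgb hany)]
        rw [pvJoin_pieces]
      · rw [if_neg (by simpa using hany)]
        have hnil := pvPieces_eq_nil_of_not_any _ (by simpa using hany)
        rw [pvPiece, if_neg (by rw [← pvJoin_pieces, hnil]; simp [pvJoin_nil])]
        rw [hnil]
        simp [pvJoin_nil]

-- ===== VERDICT (by name: the statement is the Claim_ definition above) =====
theorem number_to_korean_spec : Claim_equal_number_to_korean := by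
  intro number hdom hpre
  unfold Spec_number_to_korean number_to_korean number_to_korean_alt
  split
  · rfl
  · have hb : pvDigitBound (PySem.Int.toStr number).toList := by
      rw [PySem.Int.toList_toStr]; exact pvToChars_bound number hpre
    rw [pvALoop_eq (PySem.Int.toStr number).toList.length _ le_rfl,
        pvBLoop_eq_go _ _ 0 false [] (by simp)]
    simp only [List.nil_append]
    rw [pvMain (PySem.Int.toStr number).toList.length _ le_rfl hb]
    simp
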